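-- pv_equiv track=rewrite | github.com/ClearPath-Innovate/hearing-dashboard | enricher.py | resolve_canonical_committee
-- ===== SOURCE A (Python) =====
-- from typing import Any, Dict, List, Optional, Tuple
--
-- COMMITTEE_ID_MAP: Dict[str, Tuple[str, str]] = {
--     # (chamber, propublica_committee_id)
--     "House Energy & Commerce":               ("house",  "HSIF"),
--     "House Natural Resources":               ("house",  "HSII"),
--     "House Transportation & Infrastructure": ("house",  "HSPW"),
--     "House Ways & Means":                    ("house",  "HSWM"),
--     "House Science, Space, & Technology":    ("house",  "HSSY"),
--     "Senate Energy & Natural Resources":     ("senate", "SSEG"),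
--     "Senate Environment & Public Works":     ("senate", "SSEV"),
--     "Senate Agriculture, Nutrition, & Forestry": ("senate", "SSAF"),
--     "Senate Foreign Relations":              ("senate", "SSFR"),
--     "Senate Commerce, Science, & Transportation": ("senate", "SSCM"),
-- }
--
-- COMMITTEE_NAME_FRAGMENTS: Dict[str, str] = {
--     "energy and commerce":                   "House Energy & Commerce",
--     "energy & commerce":                     "House Energy & Commerce",
--     "natural resources":                     "House Natural Resources",
--     "transportation and infrastructure":     "House Transportation & Infrastructure",
--     "transportation & infrastructure":       "House Transportation & Infrastructure",
--     "ways and means":                        "House Ways & Means",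
--     "ways & means":                          "House Ways & Means",
--     "science, space, and technology":        "House Science, Space, & Technology",
--     "science, space, & technology":          "House Science, Space, & Technology",
--     "energy and natural resources":          "Senate Energy & Natural Resources",
--     "energy & natural resources":            "Senate Energy & Natural Resources",
--     "environment and public works":          "Senate Environment & Public Works",
--     "environment & public works":            "Senate Environment & Public Works",
--     "agriculture, nutrition":               "Senate Agriculture, Nutrition, & Forestry",
--     "foreign relations":                     "Senate Foreign Relations",
--     "commerce, science, and transportation": "Senate Commerce, Science, & Transportation",
--     "commerce, science, & transportation":   "Senate Commerce, Science, & Transportation",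
-- }
--
-- def normalize_committee_name(name: str) -> str:
--     return name.lower().replace("&", "and").strip()
--
-- def resolve_canonical_committee(committee_raw: str) -> Optional[str]:
--     """Map a raw committee name string to one of ClearPath's tracked committees."""
--     n = normalize_committee_name(committee_raw)
--     # Sort fragments longest-first so more specific matches win
--     sorted_fragments = sorted(COMMITTEE_NAME_FRAGMENTS.items(), key=lambda x: -len(x[0]))
--     for fragment, canonical in sorted_fragments:
--         if normalize_committee_name(fragment) in n:
--             return canonical
--     # Exact match against canonical keys (also longest-first)
--     for canonical in sorted(COMMITTEE_ID_MAP, key=len, reverse=True):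
--         if normalize_committee_name(canonical) in n or n in normalize_committee_name(canonical):
--             return canonical
--     return None
-- ===== SOURCE B (Python) =====
-- from typing import Any, Dict, List, Optional, Tuple
--
-- COMMITTEE_ID_MAP: Dict[str, Tuple[str, str]] = {
--     "House Energy & Commerce":               ("house",  "HSIF"),
--     "House Natural Resources":               ("house",  "HSII"),
--     "House Transportation & Infrastructure": ("house",  "HSPW"),
--     "House Ways & Means":                    ("house",  "HSWM"),
--     "House Science, Space, & Technology":    ("house",  "HSSY"),
--     "Senate Energy & Natural Resources":     ("senate", "SSEG"),
--     "Senate Environment & Public Works":     ("senate", "SSEV"),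
--     "Senate Agriculture, Nutrition, & Forestry": ("senate", "SSAF"),
--     "Senate Foreign Relations":              ("senate", "SSFR"),
--     "Senate Commerce, Science, & Transportation": ("senate", "SSCM"),
-- }
--
-- COMMITTEE_NAME_FRAGMENTS: Dict[str, str] = {
--     "energy and commerce":                   "House Energy & Commerce",
--     "energy & commerce":                     "House Energy & Commerce",
--     "natural resources":                     "House Natural Resources",
--     "transportation and infrastructure":     "House Transportation & Infrastructure",
--     "transportation & infrastructure":       "House Transportation & Infrastructure",
--     "ways and means":                        "House Ways & Means",
--     "ways & means":                          "House Ways & Means",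
--     "science, space, and technology":        "House Science, Space, & Technology",
--     "science, space, & technology":          "House Science, Space, & Technology",
--     "energy and natural resources":          "Senate Energy & Natural Resources",
--     "energy & natural resources":            "Senate Energy & Natural Resources",
--     "environment and public works":          "Senate Environment & Public Works",
--     "environment & public works":            "Senate Environment & Public Works",
--     "agriculture, nutrition":               "Senate Agriculture, Nutrition, & Forestry",
--     "foreign relations":                     "Senate Foreign Relations",
--     "commerce, science, and transportation": "Senate Commerce, Science, & Transportation",
--     "commerce, science, & transportation":   "Senate Commerce, Science, & Transportation",
-- }
--
-- def normalize_committee_name(name: str) -> str: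
--     return name.lower().replace("&", "and").strip()
--
-- def resolve_canonical_committee(committee_raw: str) -> Optional[str]:
--     """Map a raw committee name string to one of ClearPath's tracked committees.
--
--     Single pass, no sorting: track the strictly-longest matching entry; a later
--     entry replaces the current best only if strictly longer, which reproduces the
--     stable longest-first order (ties go to the earliest entry in insertion order).
--     """
--     n = normalize_committee_name(committee_raw)
--     best_len = -1
--     best: Optional[str] = None
--     for fragment, canonical in COMMITTEE_NAME_FRAGMENTS.items():
--         if len(fragment) > best_len and normalize_committee_name(fragment) in n:
--             best_len = len(fragment)
--             best = canonical
--     if best is not None: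
--         return best
--     best_len = -1
--     for canonical in COMMITTEE_ID_MAP:
--         m = normalize_committee_name(canonical)
--         if len(canonical) > best_len and (m in n or n in m):
--             best_len = len(canonical)
--             best = canonical
--     return best
-- ===== Notes on version B (the rewrite author's own statement) =====
-- stated objective: alternative
-- what changed: Replaces sort-longest-first-then-first-substring-match (in both phases) by a single unsorted max-tracking pass that keeps the strictly-longest matching entry, preserving stable-sort tie order.
import Mathlib
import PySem

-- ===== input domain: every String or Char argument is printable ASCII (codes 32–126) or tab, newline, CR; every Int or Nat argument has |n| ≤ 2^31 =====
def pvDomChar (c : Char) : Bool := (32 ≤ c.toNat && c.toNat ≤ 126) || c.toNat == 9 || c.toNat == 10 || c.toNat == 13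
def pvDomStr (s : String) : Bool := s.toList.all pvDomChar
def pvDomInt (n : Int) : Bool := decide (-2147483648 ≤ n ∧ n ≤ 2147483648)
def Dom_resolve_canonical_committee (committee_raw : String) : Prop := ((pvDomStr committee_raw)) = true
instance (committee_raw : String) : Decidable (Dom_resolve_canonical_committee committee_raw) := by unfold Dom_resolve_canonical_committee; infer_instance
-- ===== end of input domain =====

-- B replaces both sorted-longest-first first-match loops by single max-tracking passes
-- over the unsorted tables (alternative decomposition; no speed claim).

-- ===== PORT A =====
-- module constant COMMITTEE_ID_MAP (dict → association list in insertion order)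
def COMMITTEE_ID_MAP : List (String × (String × String)) :=
  [("House Energy & Commerce",               ("house",  "HSIF")),
   ("House Natural Resources",               ("house",  "HSII")),
   ("House Transportation & Infrastructure", ("house",  "HSPW")),
   ("House Ways & Means",                    ("house",  "HSWM")),
   ("House Science, Space, & Technology",    ("house",  "HSSY")),
   ("Senate Energy & Natural Resources",     ("senate", "SSEG")),
   ("Senate Environment & Public Works",     ("senate", "SSEV")),
   ("Senate Agriculture, Nutrition, & Forestry", ("senate", "SSAF")),
   ("Senate Foreign Relations",              ("senate", "SSFR")),
   ("Senate Commerce, Science, & Transportation", ("senate", "SSCM"))]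

-- module constant COMMITTEE_NAME_FRAGMENTS (dict → association list in insertion order)
def COMMITTEE_NAME_FRAGMENTS : List (String × String) :=
  [("energy and commerce",                   "House Energy & Commerce"),
   ("energy & commerce",                     "House Energy & Commerce"),
   ("natural resources",                     "House Natural Resources"),
   ("transportation and infrastructure",     "House Transportation & Infrastructure"),
   ("transportation & infrastructure",       "House Transportation & Infrastructure"),
   ("ways and means",                        "House Ways & Means"),
   ("ways & means",                          "House Ways & Means"),
   ("science, space, and technology",        "House Science, Space, & Technology"),
   ("science, space, & technology",          "House Science, Space, & Technology"),
   ("energy and natural resources",          "Senate Energy & Natural Resources"),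
   ("energy & natural resources",            "Senate Energy & Natural Resources"),
   ("environment and public works",          "Senate Environment & Public Works"),
   ("environment & public works",            "Senate Environment & Public Works"),
   ("agriculture, nutrition",               "Senate Agriculture, Nutrition, & Forestry"),
   ("foreign relations",                     "Senate Foreign Relations"),
   ("commerce, science, and transportation", "Senate Commerce, Science, & Transportation"),
   ("commerce, science, & transportation",   "Senate Commerce, Science, & Transportation")]

-- name.lower().replace("&", "and").strip()
def normalize_committee_name (name : String) : String :=
  PySem.Str.strip (PySem.Str.replace (PySem.Str.lower name) "&" "and")

-- 'for x in l: if p x: return g x' — first match, early return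
def pvA_first {α β : Type} (p : α → Bool) (g : α → β) : List α → Option β
  | [] => none
  | x :: xs => if p x then some (g x) else pvA_first p g xs

def resolve_canonical_committee (committee_raw : String) : Option String :=
  let n := normalize_committee_name committee_raw
  let sorted_fragments := PySem.List.sorted COMMITTEE_NAME_FRAGMENTS (fun x => -(PySem.Str.len x.1 : Int)) false
  match pvA_first (fun fc => PySem.Str.isIn (normalize_committee_name fc.1) n) Prod.snd sorted_fragments with
  | some c => some c
  | none =>
      pvA_first
        (fun canonical => PySem.Str.isIn (normalize_committee_name canonical) n
            || PySem.Str.isIn n (normalize_committee_name canonical)) id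
        (PySem.List.sorted (COMMITTEE_ID_MAP.map Prod.fst) (fun k => (PySem.Str.len k : Int)) true)

-- ===== PORT B =====
-- Source B's loop: keep (best_len, best); replace best only on a strictly longer match
def pvB_scan {α β : Type} (p : α → Bool) (L : α → Int) (g : α → β) :
    List α → Int → Option β → Option β
  | [], _, best => best
  | x :: xs, bl, best =>
    if decide (bl < L x) && p x then pvB_scan p L g xs (L x) (some (g x))
    else pvB_scan p L g xs bl best

def resolve_canonical_committee_alt (committee_raw : String) : Option String :=
  let n := normalize_committee_name committee_raw
  match pvB_scan (fun fc => PySem.Str.isIn (normalize_committee_name fc.1) n)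
      (fun fc => (PySem.Str.len fc.1 : Int)) Prod.snd COMMITTEE_NAME_FRAGMENTS (-1) none with
  | some c => some c
  | none =>
      pvB_scan
        (fun canonical => PySem.Str.isIn (normalize_committee_name canonical) n
            || PySem.Str.isIn n (normalize_committee_name canonical))
        (fun canonical => (PySem.Str.len canonical : Int)) id (COMMITTEE_ID_MAP.map Prod.fst) (-1) none

-- ===== PRECONDITION & SPEC =====
def Spec_resolve_canonical_committee (committee_raw : String) (out : Option String) : Prop := out = resolve_canonical_committee_alt committee_raw
instance (committee_raw : String) (out : Option String) : Decidable (Spec_resolve_canonical_committee committee_raw out) := by unfold Spec_resolve_canonical_committee; infer_instance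

-- ===== CLAIM (what is proved, stated in full; the proofs are below) =====
def Claim_equal_resolve_canonical_committee : Prop := ∀ (committee_raw : String), Dom_resolve_canonical_committee committee_raw → Spec_resolve_canonical_committee committee_raw (resolve_canonical_committee committee_raw)

-- ===== LEMMAS AND PROOFS =====

theorem pvA_first_eq_find? {α β : Type} (p : α → Bool) (g : α → β) (l : List α) :
    pvA_first p g l = (l.find? p).map g := by
  induction l with
  | nil => rfl
  | cons x xs ih =>
    simp only [pvA_first, List.find?]
    cases hx : p x <;> simp [ih]

theorem find?_insertBy_neg {α : Type} (p : α → Bool) (bef : α → α → Bool) (x : α)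
    (hx : p x = false) : ∀ ys : List α,
    (PySem.List.insertBy bef x ys).find? p = ys.find? p := by
  intro ys
  induction ys with
  | nil => simp [PySem.List.insertBy, List.find?, hx]
  | cons y ys ih =>
    simp only [PySem.List.insertBy]
    by_cases hb : bef x y = true
    · simp [hb, List.find?, hx]
    · simp only [hb]
      cases hy : p y <;> simp [List.find?, hy, ih]

theorem find?_insertBy_pos {α : Type} (p : α → Bool) (L : α → Int) (x : α)
    (hx : p x = true) : ∀ ys : List α, ys.Pairwise (fun a b => L b ≤ L a) →
    (PySem.List.insertBy (fun a b => decide (L b < L a)) x ys).find? p =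
      (match ys.find? p with
       | none => some x
       | some y => if L y < L x then some x else some y) := by
  intro ys
  induction ys with
  | nil => intro _; simp [PySem.List.insertBy, List.find?, hx]
  | cons y ys ih =>
    intro hpw
    have hpw' : ys.Pairwise (fun a b => L b ≤ L a) := hpw.tail
    have hhead : ∀ z ∈ ys, L z ≤ L y := by
      intro z hz; exact (List.pairwise_cons.mp hpw).1 z hz
    simp only [PySem.List.insertBy]
    by_cases hb : L y < L x
    · simp only [hb, decide_true, if_true]
      cases hy : p y with
      | true => simp [List.find?, hx, hy, hb]
      | false =>
        simp only [List.find?, hy, hx]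
        cases hz : ys.find? p with
        | none => rfl
        | some z =>
          have hzmem : z ∈ ys := List.mem_of_find?_eq_some hz
          have : L z < L x := lt_of_le_of_lt (hhead z hzmem) hb
          simp [this]
    · have hb' : decide (L y < L x) = false := by simp [hb]
      simp only [hb']
      rw [if_neg Bool.false_ne_true]
      cases hy : p y with
      | true => simp [List.find?, hy, hb]
      | false =>
        simp only [List.find?, hy]
        exact ih hpw'

theorem pairwise_insertBy {α : Type} (L : α → Int) (x : α) :
    ∀ ys : List α, ys.Pairwise (fun a b => L b ≤ L a) →
    (PySem.List.insertBy (fun a b => decide (L b < L a)) x ys).Pairwise (fun a b => L b ≤ L a) := by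
  intro ys
  induction ys with
  | nil => intro _; simp [PySem.List.insertBy]
  | cons y ys ih =>
    intro hpw
    have hhead : ∀ z ∈ ys, L z ≤ L y := by
      intro z hz; exact (List.pairwise_cons.mp hpw).1 z hz
    simp only [PySem.List.insertBy]
    by_cases hb : L y < L x
    · simp only [hb, decide_true, if_true]
      refine List.pairwise_cons.mpr ⟨?_, hpw⟩
      intro z hz
      rcases List.mem_cons.mp hz with rfl | h
      · exact le_of_lt hb
      · exact le_of_lt (lt_of_le_of_lt (hhead z h) hb)
    · have hb' : decide (L y < L x) = false := by simp [hb]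
      simp only [hb']
      rw [if_neg Bool.false_ne_true]
      refine List.pairwise_cons.mpr ⟨?_, ih hpw.tail⟩
      intro z hz
      rcases (PySem.List.mem_insertBy _ x z ys).mp hz with rfl | h
      · omega
      · exact hhead z h

-- the max-tracking scan over any list equals first-match over the insertion-sorted (desc, stable) list
theorem pvB_scan_eq_find?_foldl {α β : Type} (p : α → Bool) (L : α → Int) (g : α → β)
    (hL : ∀ x, 0 ≤ L x) :
    ∀ (l : List α) (acc : List α) (bl : Int) (best : Option β),
      acc.Pairwise (fun a b => L b ≤ L a) →
      ((acc.find? p = none ∧ bl = -1 ∧ best = none) ∨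
        (∃ y, acc.find? p = some y ∧ bl = L y ∧ best = some (g y))) →
      pvB_scan p L g l bl best =
        ((l.foldl (fun a x => PySem.List.insertBy (fun a b => decide (L b < L a)) x a) acc).find? p).map g := by
  intro l
  induction l with
  | nil =>
    intro acc bl best _ hinv
    rcases hinv with ⟨h1, _, h3⟩ | ⟨y, h1, _, h3⟩ <;> simp [pvB_scan, h1, h3]
  | cons x xs ih =>
    intro acc bl best hpw hinv
    simp only [List.foldl_cons]
    have hpw' := pairwise_insertBy L x acc hpw
    cases hx : p x with
    | false =>
      have hfind := find?_insertBy_neg p (fun a b => decide (L b < L a)) x hx acc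
      have hcond : (decide (bl < L x) && p x) = false := by simp [hx]
      simp only [pvB_scan, hcond, if_false, Bool.false_eq_true]
      exact ih _ bl best hpw' (by rw [hfind]; exact hinv)
    | true =>
      have hfind := find?_insertBy_pos p L x hx acc hpw
      rcases hinv with ⟨h1, h2, h3⟩ | ⟨y, h1, h2, h3⟩
      · have hcond : (decide (bl < L x) && p x) = true := by
          have := hL x; simp [hx, h2]; omega
        simp only [pvB_scan, hcond, if_true]
        refine ih _ (L x) (some (g x)) hpw' ?_
        right; exact ⟨x, by rw [hfind, h1], rfl, rfl⟩
      · by_cases hlt : L y < L x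
        · have hcond : (decide (bl < L x) && p x) = true := by simp [hx, h2, hlt]
          simp only [pvB_scan, hcond, if_true]
          refine ih _ (L x) (some (g x)) hpw' ?_
          right; exact ⟨x, by rw [hfind, h1]; simp [hlt], rfl, rfl⟩
        · have hcond : (decide (bl < L x) && p x) = false := by simp [hx, h2, hlt]
          simp only [pvB_scan, hcond, if_false, Bool.false_eq_true]
          refine ih _ bl best hpw' ?_
          right; exact ⟨y, by rw [hfind, h1]; simp [hlt], h2, h3⟩

theorem pvB_scan_eq_pvA_first_sorted {α β : Type} (p : α → Bool) (L : α → Int) (g : α → β)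
    (hL : ∀ x, 0 ≤ L x) (l : List α) :
    pvB_scan p L g l (-1) none =
      pvA_first p g (l.foldl (fun a x => PySem.List.insertBy (fun a b => decide (L b < L a)) x a) []) := by
  rw [pvA_first_eq_find?]
  exact pvB_scan_eq_find?_foldl p L g hL l [] (-1) none (by simp) (by simp)

-- ===== VERDICT (by name: the statement is the Claim_ definition above) =====
theorem resolve_canonical_committee_spec : Claim_equal_resolve_canonical_committee := by
  intro committee_raw _
  unfold Spec_resolve_canonical_committee
  unfold resolve_canonical_committee resolve_canonical_committee_alt
  have h1 : PySem.List.sorted COMMITTEE_NAME_FRAGMENTS (fun x => -(PySem.Str.len x.1 : Int)) false =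
      COMMITTEE_NAME_FRAGMENTS.foldl
        (fun a x => PySem.List.insertBy
          (fun a b => decide ((PySem.Str.len b.1 : Int) < (PySem.Str.len a.1 : Int))) x a) [] := by
    rw [PySem.List.sorted_eq_foldl_insertBy]
    congr 1
    funext acc x
    congr 1
    funext a b
    simp
  have h2 : PySem.List.sorted (COMMITTEE_ID_MAP.map Prod.fst) (fun k => (PySem.Str.len k : Int)) true =
      (COMMITTEE_ID_MAP.map Prod.fst).foldl
        (fun a x => PySem.List.insertBy
          (fun a b => decide ((PySem.Str.len b : Int) < (PySem.Str.len a : Int))) x a) [] :=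
    PySem.List.sorted_rev_eq_foldl_insertBy _ _
  have hA1 : ∀ n : String,
      pvA_first (fun fc : String × String => PySem.Str.isIn (normalize_committee_name fc.1) n) Prod.snd
        (COMMITTEE_NAME_FRAGMENTS.foldl
          (fun a x => PySem.List.insertBy
            (fun a b => decide ((PySem.Str.len b.1 : Int) < (PySem.Str.len a.1 : Int))) x a) []) =
      pvB_scan (fun fc : String × String => PySem.Str.isIn (normalize_committee_name fc.1) n)
        (fun fc => (PySem.Str.len fc.1 : Int)) Prod.snd COMMITTEE_NAME_FRAGMENTS (-1) none := by
    intro n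
    exact (pvB_scan_eq_pvA_first_sorted _ (fun fc : String × String => (PySem.Str.len fc.1 : Int)) _
      (fun x => Int.natCast_nonneg _) COMMITTEE_NAME_FRAGMENTS).symm
  have hA2 : ∀ n : String,
      pvA_first (fun canonical : String => PySem.Str.isIn (normalize_committee_name canonical) n
          || PySem.Str.isIn n (normalize_committee_name canonical)) id
        ((COMMITTEE_ID_MAP.map Prod.fst).foldl
          (fun a x => PySem.List.insertBy
            (fun a b => decide ((PySem.Str.len b : Int) < (PySem.Str.len a : Int))) x a) []) =
      pvB_scan (fun canonical : String => PySem.Str.isIn (normalize_committee_name canonical) n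
          || PySem.Str.isIn n (normalize_committee_name canonical))
        (fun canonical => (PySem.Str.len canonical : Int)) id (COMMITTEE_ID_MAP.map Prod.fst) (-1) none := by
    intro n
    exact (pvB_scan_eq_pvA_first_sorted _ (fun k : String => (PySem.Str.len k : Int)) _
      (fun x => Int.natCast_nonneg _) (COMMITTEE_ID_MAP.map Prod.fst)).symm
  simp only [h1, h2, hA1, hA2]
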